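-- pv_equiv track=rewrite | github.com/parrenthesis/character-ai | src/character_ai/core/parental_controls.py | _detect_suspicious_activity
-- ===== SOURCE A (Python) =====
-- def _detect_suspicious_activity(child_id: str, content: str) -> bool:
--     """Detect suspicious activity patterns."""
--     # Simple heuristics - in production, this would be more sophisticated
--     suspicious_patterns = [
--         "personal information",
--         "meet me",
--         "don't tell",
--         "secret",
--         "private",
--     ]
--
--     content_lower = content.lower()
--     return any(pattern in content_lower for pattern in suspicious_patterns)
-- ===== SOURCE B (Python) =====
-- def _detect_suspicious_activity(child_id: str, content: str) -> bool:
--     """Detect suspicious activity patterns (single left-to-right scan)."""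
--     patterns = (
--         "personal information",
--         "meet me",
--         "don't tell",
--         "secret",
--         "private",
--     )
--     s = content.lower()
--     # one pass over the positions of s, testing all patterns at each position
--     return any(s.startswith(patterns, i) for i in range(len(s)))
-- ===== Notes on version B (the rewrite author's own statement) =====
-- stated objective: alternative
-- what changed: Replaced five independent substring ('in') scans over the lowercased content by a single left-to-right pass over its positions, testing all five patterns at each position with startswith (tuple form).
import Mathlib
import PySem

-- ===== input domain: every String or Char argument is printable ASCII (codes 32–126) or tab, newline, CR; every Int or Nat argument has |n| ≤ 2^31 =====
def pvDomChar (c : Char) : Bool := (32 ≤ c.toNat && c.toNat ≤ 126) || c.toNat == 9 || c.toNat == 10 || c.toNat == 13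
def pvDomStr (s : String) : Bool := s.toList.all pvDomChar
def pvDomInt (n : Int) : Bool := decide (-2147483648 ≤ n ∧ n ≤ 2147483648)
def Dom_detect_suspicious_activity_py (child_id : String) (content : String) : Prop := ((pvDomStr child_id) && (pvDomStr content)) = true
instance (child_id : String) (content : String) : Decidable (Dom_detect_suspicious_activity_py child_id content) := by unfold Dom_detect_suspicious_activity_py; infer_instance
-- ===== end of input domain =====

-- B changes the search mechanism only (one positional scan with startswith instead of five 'in' scans); same result.

-- ===== PORT A =====
def detect_suspicious_activity_py (child_id : String) (content : String) : Bool :=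
  let suspicious_patterns : List String :=
    ["personal information", "meet me", "don't tell", "secret", "private"]
  let content_lower := PySem.Str.lower content
  suspicious_patterns.any (fun pattern => PySem.Str.isIn pattern content_lower)

-- ===== PORT B =====
-- the five patterns, as character lists (B tests them with startswith at each position)
def pvPatternsB : List (List Char) :=
  ["personal information".toList, "meet me".toList, "don't tell".toList,
   "secret".toList, "private".toList]

-- 'any(s.startswith(patterns, i) for i in range(len(s)))': walk the suffixes of s left to right
def pvScanB : List Char → Bool
  | [] => false
  | c :: t => pvPatternsB.any (fun p => PySem.Chars.startswith (c :: t) p) || pvScanB t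

def detect_suspicious_activity_py_alt (child_id : String) (content : String) : Bool :=
  pvScanB (PySem.Str.lower content).toList

-- ===== PRECONDITION & SPEC =====
def Spec_detect_suspicious_activity_py (child_id : String) (content : String) (out : Bool) : Prop := out = detect_suspicious_activity_py_alt child_id content
instance (child_id : String) (content : String) (out : Bool) : Decidable (Spec_detect_suspicious_activity_py child_id content out) := by unfold Spec_detect_suspicious_activity_py; infer_instance

-- ===== CLAIM (what is proved, stated in full; the proofs are below) =====
def Claim_equal_detect_suspicious_activity_py : Prop := ∀ (child_id : String) (content : String), Dom_detect_suspicious_activity_py child_id content → Spec_detect_suspicious_activity_py child_id content (detect_suspicious_activity_py child_id content)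

-- ===== LEMMAS AND PROOFS =====

-- pvScanB finds some pattern iff some pattern occurs at some position (prefix of some drop)
lemma pvScanB_iff (s : List Char) :
    pvScanB s = true ↔ ∃ p ∈ pvPatternsB, ∃ j, p <+: s.drop j := by
  induction s with
  | nil =>
    simp only [pvScanB, List.drop_nil]
    constructor
    · intro h; exact absurd h (by decide)
    · rintro ⟨p, hp, j, hpre⟩
      have : p = [] := List.prefix_nil.mp hpre
      subst this
      exact absurd hp (by decide)
  | cons c t ih =>
    simp only [pvScanB, Bool.or_eq_true, List.any_eq_true, ih,
      PySem.Chars.startswith_iff]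
    constructor
    · rintro (⟨p, hp, hpre⟩ | ⟨p, hp, j, hpre⟩)
      · exact ⟨p, hp, 0, by simpa using hpre⟩
      · exact ⟨p, hp, j + 1, by simpa using hpre⟩
    · rintro ⟨p, hp, j, hpre⟩
      cases j with
      | zero => exact Or.inl ⟨p, hp, by simpa using hpre⟩
      | succ j' => exact Or.inr ⟨p, hp, j', by simpa using hpre⟩

-- ===== VERDICT (by name: the statement is the Claim_ definition above) =====
theorem detect_suspicious_activity_py_spec : Claim_equal_detect_suspicious_activity_py := by
  intro child_id content _
  unfold Spec_detect_suspicious_activity_py detect_suspicious_activity_py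
    detect_suspicious_activity_py_alt
  set L := (PySem.Str.lower content).toList with hL
  rw [Bool.eq_iff_iff]
  simp only [List.any_eq_true, PySem.Str.isIn_eq, pvScanB_iff]
  constructor
  · rintro ⟨pat, hpat, hin⟩
    have := (PySem.Chars.exists_prefix_drop_iff_isIn (sub := pat.toList) (s := L)).mpr hin
    obtain ⟨j, hj⟩ := this
    refine ⟨pat.toList, ?_, j, hj⟩
    fin_cases hpat <;> decide
  · rintro ⟨p, hp, j, hj⟩
    have hin := (PySem.Chars.exists_prefix_drop_iff_isIn (sub := p) (s := L)).mp ⟨j, hj⟩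
    fin_cases hp
    · exact ⟨"personal information", by decide, hin⟩
    · exact ⟨"meet me", by decide, hin⟩
    · exact ⟨"don't tell", by decide, hin⟩
    · exact ⟨"secret", by decide, hin⟩
    · exact ⟨"private", by decide, hin⟩
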